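-- pv_equiv track=rewrite | github.com/Yiling-Ma/ActReview | Data_Collection/get_icml_raw_data.py | classify_reply
-- ===== SOURCE A (Python) =====
-- def classify_reply(reply: dict, venue_id: str) -> str:
--     invs = reply.get("invitations", []) or []
--     sigs = reply.get("signatures", []) or []
--
--     invs_lower = [x.lower() for x in invs if isinstance(x, str)]
--
--     # Decision
--     if any(x.endswith("decision") or "/decision" in x for x in invs_lower):
--         return "decision"
--
--     # Official review
--     if any(("official_review" in x) or x.endswith("/review") for x in invs_lower):
--         return "review"
--
--     # Meta review
--     if any(("meta_review" in x) or ("metareview" in x) for x in invs_lower):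
--         return "meta_review"
--
--     # Author rebuttal/response
--     for inv in invs_lower:
--         if any(p in inv for p in [
--             "/authors/-/official_comment", "/authors/-/rebuttal",
--             "author_response", "authors_official_comment", "rebuttal"
--         ]):
--             return "rebuttal"
--         if "/authors" in inv and ("comment" in inv or "response" in inv):
--             return "rebuttal"
--
--     for sig in sigs:
--         if isinstance(sig, str) and (sig.endswith("/Authors") or sig.lower().endswith("/authors")):
--             return "rebuttal"
--
--     return "comment"
-- ===== SOURCE B (Python) =====
-- REBUTTAL_PATTERNS = [
--     "/authors/-/official_comment", "/authors/-/rebuttal",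
--     "author_response", "authors_official_comment", "rebuttal",
-- ]
--
--
-- def classify_reply(reply: dict, venue_id: str) -> str:
--     # One pass over the invitations collecting four category flags, then a
--     # flat priority decision.  The signatures are only scanned if no
--     # invitation already marked the reply as a rebuttal.
--     has_dec = has_rev = has_meta = has_reb = False
--     for x in (reply.get("invitations", []) or []):
--         if not isinstance(x, str):
--             continue
--         x = x.lower()
--         has_dec = has_dec or x.endswith("decision") or "/decision" in x
--         has_rev = has_rev or "official_review" in x or x.endswith("/review")
--         has_meta = has_meta or "meta_review" in x or "metareview" in x
--         has_reb = has_reb or any(p in x for p in REBUTTAL_PATTERNS) or (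
--             "/authors" in x and ("comment" in x or "response" in x))
--     if not has_reb:
--         for sig in (reply.get("signatures", []) or []):
--             # s.endswith("/Authors") implies s.lower().endswith("/authors"),
--             # so the single lowercased test covers A's two checks.
--             if isinstance(sig, str) and sig.lower().endswith("/authors"):
--                 has_reb = True
--                 break
--     if has_dec:
--         return "decision"
--     if has_rev:
--         return "review"
--     if has_meta:
--         return "meta_review"
--     if has_reb:
--         return "rebuttal"
--     return "comment"
-- ===== Notes on version B (the rewrite author's own statement) =====
-- stated objective: alternative
-- what changed: Replaces A's cascade of short-circuiting any()/loop scans (each re-traversing the lowercased invitations) by a single flag-collecting pass over the invitations followed by a lazy signature scan and a flat priority decision; the redundant sig.endswith('/Authors') check is folded into the single lowercased endswith test it implies.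
import Mathlib
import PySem

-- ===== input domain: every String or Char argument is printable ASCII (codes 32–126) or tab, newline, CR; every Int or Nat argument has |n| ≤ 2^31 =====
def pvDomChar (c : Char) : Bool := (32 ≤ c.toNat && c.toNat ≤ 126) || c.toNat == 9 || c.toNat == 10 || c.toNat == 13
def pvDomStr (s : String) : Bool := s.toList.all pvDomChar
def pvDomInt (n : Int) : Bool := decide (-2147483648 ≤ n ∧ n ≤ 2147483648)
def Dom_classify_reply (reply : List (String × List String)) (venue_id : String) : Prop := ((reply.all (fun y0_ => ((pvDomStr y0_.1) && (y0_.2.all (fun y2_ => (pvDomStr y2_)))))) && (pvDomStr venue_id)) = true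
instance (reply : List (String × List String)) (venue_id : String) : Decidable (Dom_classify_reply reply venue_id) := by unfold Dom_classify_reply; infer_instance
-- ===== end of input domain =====

-- B replaces A's cascade of short-circuiting any()/loop scans by ONE flag-collecting pass
-- over the invitations followed by a flat priority decision (objective: alternative decomposition).
-- In the List (String × List String) model every dict value is a list of strings, so the
-- isinstance filters of the Python are vacuous and are not ported.

-- ===== PORT A =====
def pvRebPats : List String :=
  ["/authors/-/official_comment", "/authors/-/rebuttal",
   "author_response", "authors_official_comment", "rebuttal"]

def pvA_decTest (x : String) : Bool :=
  PySem.Str.endswith x "decision" || PySem.Str.isIn "/decision" x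

def pvA_revTest (x : String) : Bool :=
  PySem.Str.isIn "official_review" x || PySem.Str.endswith x "/review"

def pvA_metaTest (x : String) : Bool :=
  PySem.Str.isIn "meta_review" x || PySem.Str.isIn "metareview" x

-- the 'for inv in invs_lower: … return "rebuttal"' loop, as a Bool-returning scan
def pvA_rebLoop : List String → Bool
  | [] => false
  | inv :: rest =>
    if pvRebPats.any (fun p => PySem.Str.isIn p inv) then true
    else if PySem.Str.isIn "/authors" inv &&
            (PySem.Str.isIn "comment" inv || PySem.Str.isIn "response" inv) then true
    else pvA_rebLoop rest

-- the 'for sig in sigs: … return "rebuttal"' loop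
def pvA_sigLoop : List String → Bool
  | [] => false
  | s :: rest =>
    if PySem.Str.endswith s "/Authors" ||
       PySem.Str.endswith (PySem.Str.lower s) "/authors" then true
    else pvA_sigLoop rest

def classify_reply (reply : List (String × List String)) (venue_id : String) : String :=
  let d := PySem.Dict.mk reply
  let invs := d.getD "invitations" []
  let sigs := d.getD "signatures" []
  let invs_lower := invs.map PySem.Str.lower
  if invs_lower.any pvA_decTest then "decision"
  else if invs_lower.any pvA_revTest then "review"
  else if invs_lower.any pvA_metaTest then "meta_review"
  else if pvA_rebLoop invs_lower then "rebuttal"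
  else if pvA_sigLoop sigs then "rebuttal"
  else "comment"

-- ===== PORT B =====
def pvB_pats : List String :=
  ["/authors/-/official_comment", "/authors/-/rebuttal",
   "author_response", "authors_official_comment", "rebuttal"]

-- one loop iteration: update the four flags (has_dec, has_rev, has_meta, has_reb)
def pvB_step (f : Bool × Bool × Bool × Bool) (x0 : String) : Bool × Bool × Bool × Bool :=
  let x := PySem.Str.lower x0
  (f.1 || PySem.Str.endswith x "decision" || PySem.Str.isIn "/decision" x,
   f.2.1 || PySem.Str.isIn "official_review" x || PySem.Str.endswith x "/review",
   f.2.2.1 || PySem.Str.isIn "meta_review" x || PySem.Str.isIn "metareview" x,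
   f.2.2.2 || pvB_pats.any (fun p => PySem.Str.isIn p x) ||
     (PySem.Str.isIn "/authors" x &&
      (PySem.Str.isIn "comment" x || PySem.Str.isIn "response" x)))

def classify_reply_alt (reply : List (String × List String)) (venue_id : String) : String :=
  let d := PySem.Dict.mk reply
  let f := (d.getD "invitations" []).foldl pvB_step (false, false, false, false)
  let reb :=
    if f.2.2.2 then true
    else (d.getD "signatures" []).any
      (fun s => PySem.Str.endswith (PySem.Str.lower s) "/authors")
  if f.1 then "decision"
  else if f.2.1 then "review"
  else if f.2.2.1 then "meta_review"
  else if reb then "rebuttal"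
  else "comment"

-- ===== PRECONDITION & SPEC =====
def Spec_classify_reply (reply : List (String × List String)) (venue_id : String) (out : String) : Prop := out = classify_reply_alt reply venue_id
instance (reply : List (String × List String)) (venue_id : String) (out : String) : Decidable (Spec_classify_reply reply venue_id out) := by unfold Spec_classify_reply; infer_instance

-- ===== CLAIM (what is proved, stated in full; the proofs are below) =====
def Claim_equal_classify_reply : Prop := ∀ (reply : List (String × List String)) (venue_id : String), Dom_classify_reply reply venue_id → Spec_classify_reply reply venue_id (classify_reply reply venue_id)

-- ===== LEMMAS AND PROOFS =====

-- A's rebuttal predicate on one (lowercased) invitation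
def pvA_rebTest (x : String) : Bool :=
  pvRebPats.any (fun p => PySem.Str.isIn p x) ||
  (PySem.Str.isIn "/authors" x &&
   (PySem.Str.isIn "comment" x || PySem.Str.isIn "response" x))

theorem pvA_rebLoop_eq_any (l : List String) : pvA_rebLoop l = l.any pvA_rebTest := by
  induction l with
  | nil => rfl
  | cons x rest ih =>
    simp only [pvA_rebLoop, pvA_rebTest, List.any_cons, ih]
    split_ifs with h1 h2 <;> simp_all

theorem pv_authors_lower (s : String)
    (h : PySem.Str.endswith s "/Authors" = true) :
    PySem.Str.endswith (PySem.Str.lower s) "/authors" = true := by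
  simp only [PySem.Str.endswith_eq, PySem.Str.toList_lower] at *
  rw [PySem.Chars.endswith_iff] at *
  have : PySem.Chars.lower s.toList = s.toList.map PySem.Chars.lowerChar := rfl
  rw [this]
  have := h.map PySem.Chars.lowerChar
  simpa using this

theorem pvA_sigLoop_eq_any (l : List String) :
    pvA_sigLoop l = l.any (fun s => PySem.Str.endswith (PySem.Str.lower s) "/authors") := by
  induction l with
  | nil => rfl
  | cons s rest ih =>
    simp only [pvA_sigLoop, List.any_cons, ih]
    split_ifs with h
    · have hl : PySem.Str.endswith (PySem.Str.lower s) "/authors" = true := by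
        rcases Bool.or_eq_true_iff.mp h with h' | h'
        · exact pv_authors_lower s h'
        · exact h'
      rw [hl, Bool.true_or]
    · have hl : PySem.Str.endswith (PySem.Str.lower s) "/authors" = false := by
        simp only [Bool.or_eq_true, not_or, Bool.not_eq_true] at h
        exact h.2
      rw [hl, Bool.false_or]

theorem pvB_foldl_eq (invs : List String) (a b c r : Bool) :
    invs.foldl pvB_step (a, b, c, r) =
      (a || (invs.map PySem.Str.lower).any pvA_decTest,
       b || (invs.map PySem.Str.lower).any pvA_revTest,
       c || (invs.map PySem.Str.lower).any pvA_metaTest,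
       r || (invs.map PySem.Str.lower).any pvA_rebTest) := by
  induction invs generalizing a b c r with
  | nil => simp
  | cons x rest ih =>
    simp only [List.foldl_cons, pvB_step, ih, List.map_cons, List.any_cons,
      pvA_decTest, pvA_revTest, pvA_metaTest, pvA_rebTest, pvB_pats, pvRebPats]
    simp [Bool.or_assoc]

-- ===== VERDICT (by name: the statement is the Claim_ definition above) =====
theorem classify_reply_spec : Claim_equal_classify_reply := by
  intro reply venue_id _
  unfold Spec_classify_reply classify_reply classify_reply_alt
  simp only [pvB_foldl_eq, pvA_rebLoop_eq_any, pvA_sigLoop_eq_any, Bool.false_or]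
  generalize (((PySem.Dict.mk reply).getD "invitations" []).map PySem.Str.lower).any pvA_decTest = A
  generalize (((PySem.Dict.mk reply).getD "invitations" []).map PySem.Str.lower).any pvA_revTest = B
  generalize (((PySem.Dict.mk reply).getD "invitations" []).map PySem.Str.lower).any pvA_metaTest = R
  generalize (((PySem.Dict.mk reply).getD "invitations" []).map PySem.Str.lower).any pvA_rebTest = T
  generalize ((PySem.Dict.mk reply).getD "signatures" []).any
      (fun s => PySem.Str.endswith (PySem.Str.lower s) "/authors") = S
  cases A <;> cases B <;> cases R <;> cases T <;> cases S <;> rfl
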